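-- pv_equiv track=rewrite | github.com/miya256/atcoder_lib_py | legacy/other_algorithm/zeta_mobius_transform.py | superset_zeta_transform
-- ===== SOURCE A (Python) =====
-- def superset_zeta_transform(f):
--     """その要素をもつ集合の和(長さは2^n)"""
--     assert len(f) & (len(f)-1) == 0, "長さは2の冪である必要があります"
--     for i in range((len(f)-1).bit_length()):
--         bit = 1 << i
--         for j in range(len(f)):
--             if j & bit == 0:
--                 f[j] += f[j|bit]
--     return f
-- ===== SOURCE B (Python) =====
-- def superset_zeta_transform(f):
--     """その要素をもつ集合の和(長さは2^n)"""
--     def rec(base, length):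
--         if length <= 1:
--             return
--         h = length // 2
--         rec(base, h)
--         rec(base + h, h)
--         for k in range(h):
--             f[base + k] += f[base + h + k]
--     rec(0, len(f))
--     return f
-- ===== Notes on version B (the rewrite author's own statement) =====
-- stated objective: alternative
-- what changed: Replaces the iterative bit-by-bit double loop (with a per-index bit test) by an in-place recursive divide-and-conquer over the highest bit: recurse on both halves, then add the upper half into the lower half.
import Mathlib
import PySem

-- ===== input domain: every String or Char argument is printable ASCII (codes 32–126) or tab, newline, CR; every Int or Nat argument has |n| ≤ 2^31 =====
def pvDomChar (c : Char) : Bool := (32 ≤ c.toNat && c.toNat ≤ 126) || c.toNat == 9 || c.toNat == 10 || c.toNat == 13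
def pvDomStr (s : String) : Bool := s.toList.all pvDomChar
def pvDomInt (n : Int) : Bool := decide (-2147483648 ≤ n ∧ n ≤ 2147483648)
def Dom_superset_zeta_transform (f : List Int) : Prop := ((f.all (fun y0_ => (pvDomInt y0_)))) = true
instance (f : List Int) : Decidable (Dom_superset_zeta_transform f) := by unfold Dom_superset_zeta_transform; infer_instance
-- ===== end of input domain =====

-- B replaces A's iterative bit-by-bit zeta loops by an in-place recursive divide-and-conquer
-- over the highest bit (objective: alternative decomposition, same asymptotic cost).
-- Both A and B mutate the argument list in place in Python and return it; the final list
-- state is the same, and the theorems below are about the returned value.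

-- ===== PORT A =====
-- Python's int.bit_length (the bit count of the absolute value); exact for all Int.
def pyBitLength (m : Int) : Nat := Nat.size m.natAbs

-- body of `for j in range(len(f)): if j & bit == 0: f[j] += f[j|bit]`.
-- Indexing is via getD 0: inside Pre_ (length a power of two) j and j|bit are always in range,
-- exactly where Python's f[j], f[j|bit] succeed.
def stepA (bit : Nat) (g : List Int) (j : Nat) : List Int :=
  if j &&& bit == 0 then g.set j (g.getD j 0 + g.getD (j ||| bit) 0) else g

def zetaPass (bit : Nat) (g : List Int) : List Int :=
  (List.range g.length).foldl (stepA bit) g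

def superset_zeta_transform (f : List Int) : List Int :=
  (List.range (pyBitLength ((f.length : Int) - 1))).foldl (fun g i => zetaPass (1 <<< i) g) f

-- ===== PORT B =====
-- body of `for k in range(h): f[base+k] += f[base+h+k]`
def stepB (base h : Nat) (g : List Int) (k : Nat) : List Int :=
  g.set (base + k) (g.getD (base + k) 0 + g.getD (base + h + k) 0)

-- Source B's `rec(base, length)`; the fuel argument is only a structural-recursion guard
-- (the recursion depth is at most len, since len halves each level).
def zetaRecF : Nat → List Int → Nat → Nat → List Int
  | 0, f, _, _ => f
  | fuel+1, f, base, len =>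
    if len ≤ 1 then f
    else
      let h := len / 2
      let f1 := zetaRecF fuel f base h
      let f2 := zetaRecF fuel f1 (base + h) h
      (List.range h).foldl (stepB base h) f2

def superset_zeta_transform_alt (f : List Int) : List Int :=
  zetaRecF f.length f 0 f.length

-- ===== PRECONDITION & SPEC =====
-- Exactly the inputs where A's assert passes (length 0 or a power of two); elsewhere A raises AssertionError.
def Pre_superset_zeta_transform (f : List Int) : Prop :=
  f.length = 0 ∨ ∃ k ≤ f.length, f.length = 2 ^ k
instance (f : List Int) : Decidable (Pre_superset_zeta_transform f) := by
  unfold Pre_superset_zeta_transform; infer_instance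

def pvWitness_superset_zeta_transform : List Int := [1, 2, 3, 4]

def Spec_superset_zeta_transform (f : List Int) (out : List Int) : Prop :=
  out = superset_zeta_transform_alt f
instance (f : List Int) (out : List Int) : Decidable (Spec_superset_zeta_transform f out) := by
  unfold Spec_superset_zeta_transform; infer_instance

-- ===== CLAIM (what is proved, stated in full; the proofs are below) =====
def Claim_equal_superset_zeta_transform : Prop :=
  ∀ (f : List Int), Dom_superset_zeta_transform f → Pre_superset_zeta_transform f →
    Spec_superset_zeta_transform f (superset_zeta_transform f)

-- ===== LEMMAS AND PROOFS =====

-- view of a list as a total function (getD 0)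
def gOf (f : List Int) : Nat → Int := fun m => f.getD m 0

-- the pure-function counterparts of the three loop bodies
def passW (base len bit : Nat) (g : Nat → Int) : Nat → Int :=
  fun m => if base ≤ m ∧ m < base + len ∧ m &&& bit = 0 then g m + g (m ||| bit) else g m

def combW (base h : Nat) (g : Nat → Int) : Nat → Int :=
  fun m => if base ≤ m ∧ m < base + h then g m + g (m + h) else g m

def recWF : Nat → Nat → Nat → (Nat → Int) → (Nat → Int)
  | 0, _, _, g => g
  | fuel+1, base, len, g =>
    if len ≤ 1 then g
    else combW base (len / 2) (recWF fuel (base + len / 2) (len / 2) (recWF fuel base (len / 2) g))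

-- ---- generic list-level facts ----
lemma getD_set (l : List Int) (n : Nat) (v : Int) (m : Nat) :
    (l.set n v).getD m 0 = if n = m ∧ n < l.length then v else l.getD m 0 := by
  rw [List.getD_eq_getElem?_getD, List.getD_eq_getElem?_getD, List.getElem?_set]
  by_cases h1 : n = m
  · subst h1
    by_cases h2 : n < l.length
    · simp [h2]
    · have : l[n]? = none := by
        rw [List.getElem?_eq_none_iff]; omega
      simp [h2, this]
  · simp [h1]

lemma length_foldl_stepA (bit : Nat) (l : List Nat) (f : List Int) :
    (l.foldl (stepA bit) f).length = f.length := by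
  induction l generalizing f with
  | nil => rfl
  | cons a l ih =>
    rw [List.foldl_cons, ih]
    unfold stepA
    split <;> simp

lemma length_foldl_stepB (base h : Nat) (l : List Nat) (f : List Int) :
    (l.foldl (stepB base h) f).length = f.length := by
  induction l generalizing f with
  | nil => rfl
  | cons a l ih =>
    rw [List.foldl_cons, ih]
    unfold stepB
    simp

lemma length_zetaRecF (fuel : Nat) (f : List Int) (base len : Nat) :
    (zetaRecF fuel f base len).length = f.length := by
  induction fuel generalizing f base len with
  | zero => rfl
  | succ fu ih =>
    show (zetaRecF (fu+1) f base len).length = f.length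
    rw [zetaRecF]
    split
    · rfl
    · rw [length_foldl_stepB, ih, ih]

lemma getD_ge (l : List Int) (m : Nat) (h : l.length ≤ m) : l.getD m 0 = 0 := by
  rw [List.getD_eq_getElem?_getD, List.getElem?_eq_none h]
  rfl

lemma passW_pos (base len bit m : Nat) (g : Nat → Int)
    (h : base ≤ m ∧ m < base + len ∧ m &&& bit = 0) :
    passW base len bit g m = g m + g (m ||| bit) := by
  unfold passW; rw [if_pos h]

lemma passW_neg (base len bit m : Nat) (g : Nat → Int)
    (h : ¬ (base ≤ m ∧ m < base + len ∧ m &&& bit = 0)) :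
    passW base len bit g m = g m := by
  unfold passW; rw [if_neg h]

lemma stepA_pos (bit : Nat) (g : List Int) (j : Nat) (h : j &&& bit = 0) :
    stepA bit g j = g.set j (g.getD j 0 + g.getD (j ||| bit) 0) := by
  unfold stepA; rw [if_pos (by simpa using h)]

lemma stepA_neg (bit : Nat) (g : List Int) (j : Nat) (h : ¬ j &&& bit = 0) :
    stepA bit g j = g := by
  unfold stepA; rw [if_neg (by simpa using h)]

lemma stepB_eq (base h : Nat) (g : List Int) (k : Nat) :
    stepB base h g k = g.set (base + k) (g.getD (base + k) 0 + g.getD (base + h + k) 0) := rfl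

-- ---- pointwise characterisation of the loops ----
lemma getA (bit : Nat) (hbit : bit ≠ 0) (n : Nat) (f : List Int) (m : Nat) :
    gOf ((List.range n).foldl (stepA bit) f) m =
      if m < n ∧ m &&& bit = 0 then gOf f m + gOf f (m ||| bit) else gOf f m := by
  revert m
  induction n with
  | zero => intro m; simp
  | succ n ih =>
    intro m
    rw [List.range_succ, List.foldl_append, List.foldl_cons, List.foldl_nil]
    have hlen : (List.foldl (stepA bit) f (List.range n)).length = f.length :=
      length_foldl_stepA _ _ _
    simp only [gOf] at *
    by_cases hc : n &&& bit = 0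
    · have e1 : (List.foldl (stepA bit) f (List.range n)).getD n 0 = f.getD n 0 := by
        rw [ih n]; simp
      have hob : (n ||| bit) &&& bit = bit := by
        rw [Nat.and_or_distrib_right, hc, Nat.and_self]
        simp
      have e2 : (List.foldl (stepA bit) f (List.range n)).getD (n ||| bit) 0
          = f.getD (n ||| bit) 0 := by
        rw [ih (n ||| bit), if_neg]
        rintro ⟨-, hz⟩
        rw [hob] at hz
        exact hbit hz
      rw [stepA_pos bit _ n hc, getD_set, e1, e2]
      by_cases hm : n = m
      · subst hm
        by_cases hlt : n < f.length
        · rw [if_pos ⟨rfl, by omega⟩, if_pos ⟨Nat.lt_succ_self n, hc⟩]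
        · have z1 : f.getD n 0 = 0 := getD_ge _ _ (by omega)
          have z2 : f.getD (n ||| bit) 0 = 0 :=
            getD_ge _ _ (le_trans (by omega) Nat.left_le_or)
          rw [if_neg (by omega), if_pos ⟨Nat.lt_succ_self n, hc⟩, ih n, if_neg (by omega),
            z1, z2]
          simp
      · rw [if_neg (fun h => hm h.1), ih m]
        by_cases h2 : m < n ∧ m &&& bit = 0
        · rw [if_pos h2, if_pos ⟨by omega, h2.2⟩]
        · rw [if_neg h2, if_neg]
          rintro ⟨hlt, hcl⟩
          exact h2 ⟨by omega, hcl⟩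
    · rw [stepA_neg bit _ n hc, ih m]
      by_cases h2 : m < n ∧ m &&& bit = 0
      · rw [if_pos h2, if_pos ⟨by omega, h2.2⟩]
      · rw [if_neg h2, if_neg]
        rintro ⟨hlt, hcl⟩
        rcases Nat.lt_succ_iff_lt_or_eq.1 hlt with h | h
        · exact h2 ⟨h, hcl⟩
        · subst h; exact hc hcl

lemma length_zetaPass (bit : Nat) (g : List Int) : (zetaPass bit g).length = g.length :=
  length_foldl_stepA bit _ g

lemma getZetaPass (bit : Nat) (hbit : bit ≠ 0) (g : List Int) (m : Nat) :
    gOf (zetaPass bit g) m =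
      if m < g.length ∧ m &&& bit = 0 then gOf g m + gOf g (m ||| bit) else gOf g m :=
  getA bit hbit g.length g m

lemma getB (base h : Nat) (t : Nat) (ht : t ≤ h) (f : List Int) (m : Nat) :
    gOf ((List.range t).foldl (stepB base h) f) m =
      if base ≤ m ∧ m < base + t then gOf f m + gOf f (m + h) else gOf f m := by
  revert m
  induction t with
  | zero => intro m; simp
  | succ t ih =>
    intro m
    have ht' : t ≤ h := by omega
    rw [List.range_succ, List.foldl_append, List.foldl_cons, List.foldl_nil]
    have hlen : (List.foldl (stepB base h) f (List.range t)).length = f.length :=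
      length_foldl_stepB _ _ _ _
    simp only [gOf] at *
    have e1 : (List.foldl (stepB base h) f (List.range t)).getD (base + t) 0
        = f.getD (base + t) 0 := by
      rw [ih ht' (base + t), if_neg (by omega)]
    have e2 : (List.foldl (stepB base h) f (List.range t)).getD (base + h + t) 0
        = f.getD (base + h + t) 0 := by
      rw [ih ht' (base + h + t), if_neg (by omega)]
    rw [stepB_eq, getD_set, e1, e2]
    by_cases hm : base + t = m
    · subst hm
      by_cases hlt : base + t < f.length
      · rw [if_pos ⟨rfl, by omega⟩, if_pos (by omega)]
        congr 1
        congr 1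
        omega
      · have z1 : f.getD (base + t) 0 = 0 := getD_ge _ _ (by omega)
        have z2 : f.getD (base + t + h) 0 = 0 := getD_ge _ _ (by omega)
        rw [if_neg (by omega), if_pos (by omega), ih ht' (base + t), if_neg (by omega),
          z1, z2]
        simp
    · rw [if_neg (fun h => hm h.1), ih ht' m]
      by_cases h2 : base ≤ m ∧ m < base + t
      · rw [if_pos h2, if_pos ⟨h2.1, by omega⟩]
      · rw [if_neg h2, if_neg]
        rintro ⟨ha, hb2⟩
        exact h2 ⟨ha, by omega⟩

lemma getRec (fuel : Nat) (f : List Int) (base len : Nat) :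
    gOf (zetaRecF fuel f base len) = recWF fuel base len (gOf f) := by
  induction fuel generalizing f base len with
  | zero => rfl
  | succ fu ih =>
    show gOf (zetaRecF (fu+1) f base len) = recWF (fu+1) base len (gOf f)
    rw [zetaRecF, recWF]
    by_cases hl : len ≤ 1
    · rw [if_pos hl, if_pos hl]
    · rw [if_neg hl, if_neg hl]
      funext m
      rw [getB base (len/2) (len/2) le_rfl _ m, ih, ih]
      rfl

-- ---- bit arithmetic ----
lemma and_two_pow_eq_zero_iff (m i : Nat) : m &&& 2 ^ i = 0 ↔ m.testBit i = false := by
  rw [Nat.and_two_pow]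
  cases h : m.testBit i
  · simp
  · simp [(Nat.two_pow_pos i).ne']

lemma testBit_add_left (b s i : Nat) (hd : 2 ^ (i+1) ∣ b) :
    (b + s).testBit i = s.testBit i := by
  obtain ⟨c, rfl⟩ := hd
  have h1 : ∀ x : Nat, x.testBit i = (x % 2 ^ (i+1)).testBit i := by
    intro x
    rw [Nat.testBit_mod_two_pow]
    simp
  rw [h1 (2 ^ (i+1) * c + s), h1 s, Nat.mul_add_mod]

lemma testBit_false_mod (s i : Nat) (hb : s.testBit i = false) : s % 2 ^ (i+1) < 2 ^ i := by
  have hp : 0 < 2 ^ i := Nat.two_pow_pos i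
  have h1 : (s % 2 ^ (i+1)).testBit i = false := by
    rw [Nat.testBit_mod_two_pow]; simp [hb]
  have h2 : s % 2 ^ (i+1) < 2 ^ (i+1) := Nat.mod_lt _ (Nat.two_pow_pos _)
  have hps : 2 ^ (i+1) = 2 * 2 ^ i := by rw [pow_succ]; ring
  have h3 : s % 2 ^ (i+1) / 2 ^ i < 2 := (Nat.div_lt_iff_lt_mul hp).2 (by omega)
  have h4 : ¬ (s % 2 ^ (i+1) / 2 ^ i % 2 = 1) := by
    simpa [Nat.testBit_eq_decide_div_mod_eq] using h1
  have h5 : s % 2 ^ (i+1) / 2 ^ i = 0 := by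
    generalize hx : s % 2 ^ (i+1) / 2 ^ i = x at h3 h4
    omega
  rcases Nat.div_eq_zero_iff.1 h5 with h | h
  · omega
  · exact h

lemma testBit_ge (r i : Nat) (h1 : 2 ^ i ≤ r) (h2 : r < 2 ^ (i+1)) : r.testBit i = true := by
  have hp : 0 < 2 ^ i := Nat.two_pow_pos i
  have h3 : r / 2 ^ i = 1 := by
    apply Nat.div_eq_of_lt_le (by omega)
    have : 2 ^ (i+1) = 2 * 2 ^ i := by rw [pow_succ]; ring
    omega
  rw [Nat.testBit_eq_decide_div_mod_eq, h3]
  decide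

lemma or_two_pow_eq_add (m i : Nat) (hb : m.testBit i = false) : m ||| 2 ^ i = m + 2 ^ i := by
  have hp : 0 < 2 ^ (i+1) := Nat.two_pow_pos _
  have hps : 2 ^ (i+1) = 2 ^ i + 2 ^ i := by rw [pow_succ]; ring
  have hr : m % 2 ^ (i+1) < 2 ^ i := testBit_false_mod m i hb
  have hq := Nat.div_add_mod m (2 ^ (i+1))
  apply Nat.eq_of_testBit_eq
  intro j
  rw [Nat.testBit_or, Nat.testBit_two_pow]
  rcases lt_trichotomy j i with hj | heq | hj
  · have hd : (2:Nat) ^ (j+1) ∣ 2 ^ i := Nat.pow_dvd_pow 2 hj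
    have e : (m + 2 ^ i).testBit j = m.testBit j := by
      rw [Nat.add_comm m (2 ^ i), testBit_add_left _ _ _ hd]
    rw [e]
    simp [Nat.ne_of_gt hj]
  · subst heq
    have e1 : m + 2 ^ j = 2 ^ (j+1) * (m / 2 ^ (j+1)) + (m % 2 ^ (j+1) + 2 ^ j) := by omega
    have h7 : (m % 2 ^ (j+1) + 2 ^ j).testBit j = true :=
      testBit_ge _ _ (by omega) (by omega)
    rw [e1, testBit_add_left _ _ _ (dvd_mul_right _ _), h7]
    simp
  · have e1 : m + 2 ^ i = 2 ^ (i+1) * (m / 2 ^ (i+1)) + (m % 2 ^ (i+1) + 2 ^ i) := by omega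
    have e2 : (m + 2 ^ i) / 2 ^ (i+1) = m / 2 ^ (i+1) := by
      apply Nat.div_eq_of_lt_le
      · calc m / 2 ^ (i+1) * 2 ^ (i+1) = 2 ^ (i+1) * (m / 2 ^ (i+1)) := by ring
          _ ≤ m + 2 ^ i := by omega
      · have h6 : (m / 2 ^ (i+1) + 1) * 2 ^ (i+1) = 2 ^ (i+1) * (m / 2 ^ (i+1)) + 2 ^ (i+1) := by
          ring
        omega
    have e3 : ∀ x : Nat, x.testBit j = (x / 2 ^ (i+1)).testBit (j - (i+1)) := by
      intro x
      rw [Nat.testBit_div_two_pow]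
      congr 1
      omega
    rw [e3, e3, e2]
    simp [Nat.ne_of_lt hj]

lemma add_pow_lt (s i k : Nat) (hik : i < k) (hs : s < 2 ^ k) (hb : s.testBit i = false) :
    s + 2 ^ i < 2 ^ k := by
  have hp : 0 < 2 ^ (i+1) := Nat.two_pow_pos _
  have hps : 2 ^ (i+1) = 2 ^ i + 2 ^ i := by rw [pow_succ]; ring
  obtain ⟨c, hc⟩ : (2:Nat) ^ (i+1) ∣ 2 ^ k := Nat.pow_dvd_pow 2 hik
  have ht : s % 2 ^ (i+1) < 2 ^ i := testBit_false_mod s i hb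
  have hq := Nat.div_add_mod s (2 ^ (i+1))
  have hac : s / 2 ^ (i+1) < c := by
    by_contra hge
    push_neg at hge
    have h2 : 2 ^ (i+1) * c ≤ 2 ^ (i+1) * (s / 2 ^ (i+1)) := Nat.mul_le_mul_left _ hge
    omega
  have h3 : 2 ^ (i+1) * (s / 2 ^ (i+1) + 1) ≤ 2 ^ (i+1) * c := Nat.mul_le_mul_left _ (by omega)
  have h4 : 2 ^ (i+1) * (s / 2 ^ (i+1) + 1) = 2 ^ (i+1) * (s / 2 ^ (i+1)) + 2 ^ (i+1) := by ring
  omega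

-- window membership: under alignment, the closure fact for a pass
lemma window_closure (base m k i : Nat) (hd : 2 ^ k ∣ base) (hik : i < k)
    (h1 : base ≤ m) (h2 : m < base + 2 ^ k) (hb : m &&& 2 ^ i = 0) :
    m ||| 2 ^ i = m + 2 ^ i ∧ m + 2 ^ i < base + 2 ^ k := by
  have hb' : m.testBit i = false := (and_two_pow_eq_zero_iff _ _).1 hb
  have hdi : (2:Nat) ^ (i+1) ∣ base := (Nat.pow_dvd_pow 2 hik).trans hd
  have hsm : m = base + (m - base) := by omega
  have hbs : (m - base).testBit i = false := by
    rw [hsm, testBit_add_left _ _ _ hdi] at hb'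
    exact hb'
  have hlt : m - base < 2 ^ k := by omega
  have h2 := add_pow_lt (m - base) i k hik hlt hbs
  exact ⟨or_two_pow_eq_add m i hb', by omega⟩

-- ---- function-level structure of the passes ----
lemma combW_eq_passW_top (base k : Nat) (hd : 2 ^ (k+1) ∣ base) (g : Nat → Int) :
    combW base (2 ^ k) g = passW base (2 ^ (k+1)) (2 ^ k) g := by
  funext m
  have hd' : (2:Nat) ^ k ∣ base := (Nat.pow_dvd_pow 2 (Nat.le_succ k)).trans hd
  have hp : (2:Nat) ^ (k+1) = 2 ^ k + 2 ^ k := by rw [pow_succ]; ring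
  by_cases h1 : base ≤ m ∧ m < base + 2 ^ k
  · have hbit : m.testBit k = false := by
      have h2 : (m - base).testBit k = false := Nat.testBit_lt_two_pow (by omega)
      have h3 : m = base + (m - base) := by omega
      rw [h3, testBit_add_left _ _ _ hd]
      exact h2
    have hand : m &&& 2 ^ k = 0 := (and_two_pow_eq_zero_iff _ _).2 hbit
    have hor := or_two_pow_eq_add m k hbit
    rw [passW_pos _ _ _ _ _ ⟨h1.1, by omega, hand⟩, hor]
    unfold combW
    rw [if_pos h1]
  · by_cases h2 : base ≤ m ∧ m < base + 2 ^ (k+1)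
    · have hbit : m.testBit k = true := by
        have h3 : m = base + (m - base) := by omega
        rw [h3, testBit_add_left _ _ _ hd]
        exact testBit_ge _ _ (by omega) (by omega)
      have hand : m &&& 2 ^ k ≠ 0 := by
        rw [Nat.and_two_pow, hbit]
        simp [(Nat.two_pow_pos k).ne']
      rw [passW_neg _ _ _ _ _ (by rintro ⟨-, -, hz⟩; exact hand hz)]
      unfold combW
      rw [if_neg h1]
    · rw [passW_neg _ _ _ _ _ (by rintro ⟨ha, hb2, -⟩; exact h2 ⟨ha, hb2⟩)]
      unfold combW
      rw [if_neg h1]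

lemma passW_split (base k i : Nat) (hik : i < k) (hd : 2 ^ (k+1) ∣ base) (g : Nat → Int) :
    passW base (2 ^ (k+1)) (2 ^ i) g =
      passW (base + 2 ^ k) (2 ^ k) (2 ^ i) (passW base (2 ^ k) (2 ^ i) g) := by
  funext m
  have hd' : (2:Nat) ^ k ∣ base := (Nat.pow_dvd_pow 2 (Nat.le_succ k)).trans hd
  have hdu : (2:Nat) ^ k ∣ base + 2 ^ k := dvd_add hd' dvd_rfl
  have hp : (2:Nat) ^ (k+1) = 2 ^ k + 2 ^ k := by rw [pow_succ]; ring
  by_cases hm1 : base ≤ m ∧ m < base + 2 ^ k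
  · by_cases hbit : m &&& 2 ^ i = 0
    · obtain ⟨hor, hcl⟩ := window_closure base m k i hd' hik hm1.1 hm1.2 hbit
      rw [passW_pos base (2 ^ (k+1)) (2 ^ i) m g ⟨hm1.1, by omega, hbit⟩,
        passW_neg (base + 2 ^ k) (2 ^ k) (2 ^ i) m (passW base (2 ^ k) (2 ^ i) g) (by rintro ⟨hge, -, -⟩; omega),
        passW_pos base (2 ^ k) (2 ^ i) m g ⟨hm1.1, hm1.2, hbit⟩]
    · rw [passW_neg base (2 ^ (k+1)) (2 ^ i) m g (by rintro ⟨-, -, hz⟩; exact hbit hz),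
        passW_neg (base + 2 ^ k) (2 ^ k) (2 ^ i) m (passW base (2 ^ k) (2 ^ i) g) (by rintro ⟨hge, -, -⟩; omega),
        passW_neg base (2 ^ k) (2 ^ i) m g (by rintro ⟨-, -, hz⟩; exact hbit hz)]
  · by_cases hm2 : base + 2 ^ k ≤ m ∧ m < base + 2 ^ (k+1)
    · by_cases hbit : m &&& 2 ^ i = 0
      · obtain ⟨hor, hcl⟩ :=
          window_closure (base + 2 ^ k) m k i hdu hik hm2.1 (by omega) hbit
        have e1 : passW base (2 ^ k) (2 ^ i) g m = g m := by
          apply passW_neg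
          rintro ⟨-, hlt, -⟩
          omega
        have hgt : ¬ (m ||| 2 ^ i < base + 2 ^ k) :=
          Nat.not_lt.2 (le_trans hm2.1 Nat.left_le_or)
        have e2 : passW base (2 ^ k) (2 ^ i) g (m ||| 2 ^ i) = g (m ||| 2 ^ i) :=
          passW_neg base (2 ^ k) (2 ^ i) (m ||| 2 ^ i) g (fun h => hgt h.2.1)
        rw [passW_pos base (2 ^ (k+1)) (2 ^ i) m g ⟨by omega, by omega, hbit⟩,
          passW_pos (base + 2 ^ k) (2 ^ k) (2 ^ i) m (passW base (2 ^ k) (2 ^ i) g) ⟨hm2.1, by omega, hbit⟩, e1, e2]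
      · rw [passW_neg base (2 ^ (k+1)) (2 ^ i) m g (by rintro ⟨-, -, hz⟩; exact hbit hz),
          passW_neg (base + 2 ^ k) (2 ^ k) (2 ^ i) m (passW base (2 ^ k) (2 ^ i) g) (by rintro ⟨-, -, hz⟩; exact hbit hz),
          passW_neg base (2 ^ k) (2 ^ i) m g (by rintro ⟨-, hlt, -⟩; omega)]
    · rw [passW_neg base (2 ^ (k+1)) (2 ^ i) m g
          (by
            rintro ⟨ha, hb2, -⟩
            rcases Nat.lt_or_ge m (base + 2 ^ k) with h | h
            · exact hm1 ⟨ha, h⟩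
            · exact hm2 ⟨h, hb2⟩),
        passW_neg (base + 2 ^ k) (2 ^ k) (2 ^ i) m (passW base (2 ^ k) (2 ^ i) g)
          (by rintro ⟨ha, hb2, -⟩; exact hm2 ⟨ha, by omega⟩),
        passW_neg base (2 ^ k) (2 ^ i) m g
          (by rintro ⟨ha, hb2, -⟩; exact hm1 ⟨ha, hb2⟩)]

lemma passW_commute (b1 l1 bit1 b2 l2 bit2 : Nat) (h12 : b1 + l1 ≤ b2)
    (hc : ∀ m, b1 ≤ m → m < b1 + l1 → m &&& bit1 = 0 → m ||| bit1 < b1 + l1)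
    (g : Nat → Int) :
    passW b2 l2 bit2 (passW b1 l1 bit1 g) = passW b1 l1 bit1 (passW b2 l2 bit2 g) := by
  funext m
  by_cases hm1 : b1 ≤ m ∧ m < b1 + l1 ∧ m &&& bit1 = 0
  · have hcl := hc m hm1.1 hm1.2.1 hm1.2.2
    have e1 : passW b2 l2 bit2 g m = g m :=
      passW_neg _ _ _ _ _ (by rintro ⟨hge, -, -⟩; omega)
    have e2 : passW b2 l2 bit2 g (m ||| bit1) = g (m ||| bit1) :=
      passW_neg _ _ _ _ _ (by rintro ⟨hge, -, -⟩; omega)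
    rw [passW_neg b2 l2 bit2 m (passW b1 l1 bit1 g) (by rintro ⟨hge, -, -⟩; omega),
      passW_pos b1 l1 bit1 m g hm1,
      passW_pos b1 l1 bit1 m (passW b2 l2 bit2 g) hm1, e1, e2]
  · by_cases hm2 : b2 ≤ m ∧ m < b2 + l2 ∧ m &&& bit2 = 0
    · have e1 : passW b1 l1 bit1 g m = g m :=
        passW_neg _ _ _ _ _ (by rintro ⟨-, hlt, -⟩; omega)
      have hle : m ≤ m ||| bit2 := Nat.left_le_or
      have e2 : passW b1 l1 bit1 g (m ||| bit2) = g (m ||| bit2) :=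
        passW_neg _ _ _ _ _ (by rintro ⟨-, hlt, -⟩; omega)
      rw [passW_pos b2 l2 bit2 m (passW b1 l1 bit1 g) hm2,
        passW_neg b1 l1 bit1 m (passW b2 l2 bit2 g) hm1,
        passW_pos b2 l2 bit2 m g hm2, e1, e2]
    · rw [passW_neg b2 l2 bit2 m (passW b1 l1 bit1 g) hm2,
        passW_neg b1 l1 bit1 m (passW b2 l2 bit2 g) hm1,
        passW_neg b1 l1 bit1 m g hm1,
        passW_neg b2 l2 bit2 m g hm2]


-- ---- fold bookkeeping ----
lemma foldl_fun_congr {α : Type} (F F' : Nat → α → α) (k : Nat)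
    (h : ∀ i < k, ∀ x, F i x = F' i x) (x : α) :
    (List.range k).foldl (fun a i => F i a) x = (List.range k).foldl (fun a i => F' i a) x := by
  induction k with
  | zero => simp
  | succ k ih =>
    rw [List.range_succ]
    simp only [List.foldl_append, List.foldl_cons, List.foldl_nil]
    rw [ih (fun i hi x => h i (by omega) x), h k (by omega)]

lemma foldl_fun_commute {α : Type} (F : Nat → α → α) (G : α → α) (k : Nat)
    (h : ∀ i < k, ∀ x, F i (G x) = G (F i x)) (x : α) :
    (List.range k).foldl (fun a i => F i a) (G x) = G ((List.range k).foldl (fun a i => F i a) x) := by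
  induction k with
  | zero => simp
  | succ k ih =>
    rw [List.range_succ]
    simp only [List.foldl_append, List.foldl_cons, List.foldl_nil]
    rw [ih (fun i hi x => h i (by omega) x), h k (by omega)]

lemma foldl_comp_split {α : Type} (Lo Hi : Nat → α → α) (k : Nat)
    (hcomm : ∀ i < k, ∀ j < k, ∀ x, Hi i (Lo j x) = Lo j (Hi i x)) (x : α) :
    (List.range k).foldl (fun a i => Hi i (Lo i a)) x =
      (List.range k).foldl (fun a i => Hi i a) ((List.range k).foldl (fun a i => Lo i a) x) := by
  induction k with
  | zero => simp
  | succ k ih =>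
    rw [List.range_succ]
    simp only [List.foldl_append, List.foldl_cons, List.foldl_nil]
    rw [ih (fun i hi j hj x => hcomm i (by omega) j (by omega) x)]
    congr 1
    exact (foldl_fun_commute Hi (Lo k) k
      (fun i hi x => hcomm i (by omega) k (by omega) x)
      ((List.range k).foldl (fun a i => Lo i a) x)).symm

-- ---- main function-level equivalence ----
lemma recWF_low (fuel base len : Nat) (hlen : len ≤ 1) (g : Nat → Int) :
    recWF fuel base len g = g := by
  cases fuel with
  | zero => rfl
  | succ fu => simp only [recWF, if_pos hlen]

lemma recWF_eq_passes (k : Nat) : ∀ (fuel base : Nat) (g : Nat → Int), 2 ^ k ≤ fuel → 2 ^ k ∣ base →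
    recWF fuel base (2 ^ k) g = (List.range k).foldl (fun g i => passW base (2 ^ k) (2 ^ i) g) g := by
  induction k with
  | zero =>
    intro fuel base g hf hd
    rw [pow_zero, recWF_low fuel base 1 le_rfl, List.range_zero, List.foldl_nil]
  | succ k ih =>
    intro fuel base g hf hd
    have hpos : 0 < 2 ^ k := Nat.two_pow_pos k
    have hp : (2:Nat) ^ (k+1) = 2 ^ k + 2 ^ k := by rw [pow_succ]; ring
    obtain ⟨fu, rfl⟩ : ∃ fu, fuel = fu + 1 := ⟨fuel - 1, by omega⟩
    have hdiv : 2 ^ (k+1) / 2 = 2 ^ k := by omega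
    have hd' : (2:Nat) ^ k ∣ base := (Nat.pow_dvd_pow 2 (Nat.le_succ k)).trans hd
    have hdu : (2:Nat) ^ k ∣ base + 2 ^ k := dvd_add hd' dvd_rfl
    have hfu : 2 ^ k ≤ fu := by omega
    simp only [recWF]
    rw [if_neg (by omega), hdiv]
    rw [ih fu base g hfu hd',
      ih fu (base + 2 ^ k)
        ((List.range k).foldl (fun g i => passW base (2 ^ k) (2 ^ i) g) g) hfu hdu]
    rw [List.range_succ]
    simp only [List.foldl_append, List.foldl_cons, List.foldl_nil]
    rw [← combW_eq_passW_top base k hd]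
    congr 1
    have hcm : ∀ i < k, ∀ j < k, ∀ x : Nat → Int,
        passW (base + 2 ^ k) (2 ^ k) (2 ^ i) (passW base (2 ^ k) (2 ^ j) x) =
          passW base (2 ^ k) (2 ^ j) (passW (base + 2 ^ k) (2 ^ k) (2 ^ i) x) := by
      intro i hi j hj x
      apply passW_commute base (2 ^ k) (2 ^ j) (base + 2 ^ k) (2 ^ k) (2 ^ i) le_rfl
      intro m h1 h2 hb
      obtain ⟨hor, hcl⟩ := window_closure base m k j hd' hj h1 h2 hb
      omega
    exact ((foldl_fun_congr (fun i x => passW base (2 ^ (k+1)) (2 ^ i) x)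
        (fun i x => passW (base + 2 ^ k) (2 ^ k) (2 ^ i) (passW base (2 ^ k) (2 ^ i) x)) k
        (fun i hi x => passW_split base k i hi hd x) g).trans
      (foldl_comp_split (fun i x => passW base (2 ^ k) (2 ^ i) x)
        (fun i x => passW (base + 2 ^ k) (2 ^ k) (2 ^ i) x) k hcm g)).symm

-- ---- assembling the two ports ----
lemma size_two_pow_sub_one (k : Nat) : Nat.size (2 ^ k - 1) = k := by
  cases k with
  | zero => simp
  | succ k =>
    apply le_antisymm
    · exact Nat.size_le.2 (by have := Nat.two_pow_pos (k+1); omega)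
    · apply Nat.lt_size.2
      have hp : (2:Nat) ^ (k+1) = 2 ^ k + 2 ^ k := by rw [pow_succ]; ring
      have := Nat.two_pow_pos k
      omega

lemma liftA (K : Nat) (f : List Int) :
    ((List.range K).foldl (fun g i => zetaPass (2 ^ i) g) f).length = f.length ∧
    gOf ((List.range K).foldl (fun g i => zetaPass (2 ^ i) g) f) =
      (List.range K).foldl (fun G i => passW 0 f.length (2 ^ i) G) (gOf f) := by
  induction K with
  | zero => exact ⟨rfl, rfl⟩
  | succ K ih =>
    obtain ⟨ihl, ihg⟩ := ih
    rw [List.range_succ]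
    simp only [List.foldl_append, List.foldl_cons, List.foldl_nil]
    constructor
    · rw [length_zetaPass, ihl]
    · funext m
      rw [getZetaPass _ (Nat.two_pow_pos K).ne' _ m, ihg, ihl]
      unfold passW
      by_cases hcond : m < f.length ∧ m &&& 2 ^ K = 0
      · rw [if_pos hcond, if_pos ⟨Nat.zero_le m, by omega, hcond.2⟩]
      · rw [if_neg hcond, if_neg (by rintro ⟨-, h2, h3⟩; exact hcond ⟨by omega, h3⟩)]

-- ===== VERDICT (by name: the statement is the Claim_ definition above) =====
theorem superset_zeta_transform_spec : Claim_equal_superset_zeta_transform := by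
  intro f _ hpre
  unfold Spec_superset_zeta_transform
  rcases hpre with h0 | ⟨k, hk, hlen⟩
  · have hf : f = [] := List.length_eq_zero_iff.1 h0
    subst hf
    have hz : ∀ bit : Nat, zetaPass bit [] = [] := fun bit => rfl
    have hA0 : ∀ l : List Nat, (l.foldl (fun g i => zetaPass (1 <<< i) g) []) = [] := by
      intro l
      induction l with
      | nil => rfl
      | cons a l ihl => rw [List.foldl_cons, hz]; exact ihl
    show (List.range _).foldl (fun g i => zetaPass (1 <<< i) g) [] = _
    rw [hA0]
    rfl
  · unfold superset_zeta_transform superset_zeta_transform_alt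
    have hKA : pyBitLength ((f.length : Int) - 1) = k := by
      unfold pyBitLength
      rw [hlen]
      have hpos := Nat.two_pow_pos k
      have h1 : ((2 ^ k : Nat) : Int) - 1 = ((2 ^ k - 1 : Nat) : Int) := by omega
      rw [h1, Int.natAbs_natCast]
      exact size_two_pow_sub_one k
    rw [hKA]
    simp only [Nat.one_shiftLeft]
    obtain ⟨hlenA, hgA⟩ := liftA k f
    apply List.ext_getElem
    · rw [hlenA, length_zetaRecF, hlen]
    · intro i h1 h2
      have hptw : gOf ((List.range k).foldl (fun g i => zetaPass (2 ^ i) g) f) i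
          = gOf (zetaRecF f.length f 0 f.length) i := by
        rw [hgA, getRec, hlen,
          recWF_eq_passes k (2 ^ k) 0 (gOf f) le_rfl (dvd_zero _)]
      calc ((List.range k).foldl (fun g i => zetaPass (2 ^ i) g) f)[i]
          = ((List.range k).foldl (fun g i => zetaPass (2 ^ i) g) f).getD i 0 :=
            (List.getD_eq_getElem _ 0 h1).symm
        _ = (zetaRecF f.length f 0 f.length).getD i 0 := hptw
        _ = (zetaRecF f.length f 0 f.length)[i] := List.getD_eq_getElem _ 0 h2
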